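-- pv_equiv track=rewrite | github.com/gjwlsdnd224/projects | jher3-238_PA4.py | biggest_vertebrate
-- ===== SOURCE A (Python) =====
-- def biggest_vertebrate(animals, weights, vertebrates):
-- 	if(len(animals) == 0 or len(vertebrates) == 0):#if list is empty return None
-- 		return None
-- 	greatest_weight = 0
-- 	greatest_animal_weight = ""
-- 	for i in range(len(animals)):
-- 		for j in range(len(vertebrates)):
-- 			if(vertebrates[j] == animals[i]):#finds animals that exist in the vertebrates list
-- 				if(weights[i] > greatest_weight):
-- 					greatest_animal_weight = animals[i]
-- 					greatest_weight = weights[i]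
-- 				break
-- 	if(greatest_weight == 0):
-- 		return None
-- 	else:
-- 		return greatest_animal_weight
-- ===== SOURCE B (Python) =====
-- def biggest_vertebrate(animals, weights, vertebrates):
--     vset = set(vertebrates)
--     cands = [i for i in range(len(animals))
--              if animals[i] in vset and weights[i] > 0]
--     if not cands:
--         return None
--     cands.sort(key=lambda i: weights[i], reverse=True)
--     return animals[cands[0]]
-- ===== Notes on version B (the rewrite author's own statement) =====
-- stated objective: alternative
-- what changed: Replaces A's nested membership scan plus running strict-max state by: build a set of vertebrates, collect candidate indices with positive weight in one pass, stable-sort them by weight descending, and return the animal at the first index (the set lookup removes the inner scan over vertebrates).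
import Mathlib
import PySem

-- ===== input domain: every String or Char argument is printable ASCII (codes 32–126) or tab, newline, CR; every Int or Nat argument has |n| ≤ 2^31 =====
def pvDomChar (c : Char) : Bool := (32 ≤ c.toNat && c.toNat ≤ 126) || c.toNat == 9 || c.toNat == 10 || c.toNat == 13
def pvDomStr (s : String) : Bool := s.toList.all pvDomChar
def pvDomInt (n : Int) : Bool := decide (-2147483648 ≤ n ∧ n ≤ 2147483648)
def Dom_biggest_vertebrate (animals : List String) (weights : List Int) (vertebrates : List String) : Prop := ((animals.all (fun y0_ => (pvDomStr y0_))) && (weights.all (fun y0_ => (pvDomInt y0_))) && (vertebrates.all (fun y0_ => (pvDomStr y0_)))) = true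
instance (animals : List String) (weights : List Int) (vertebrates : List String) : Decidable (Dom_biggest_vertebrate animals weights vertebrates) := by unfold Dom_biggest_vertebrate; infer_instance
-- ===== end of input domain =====

-- B replaces A's nested running-max scan by set-filter + stable descending sort + first element; equal return values, objective: alternative.

-- ===== PORT A =====
-- shared transliterations of the Python subscripts animals[i] / weights[i] for an index i of
-- range(len(animals)); the .getD default is only reached where Python raises IndexError (outside Pre_)
def pvGetS (xs : List String) (i : Nat) : String := (PySem.List.pyGet? xs (i : Int)).getD ""
def pvGetI (xs : List Int) (i : Nat) : Int := (PySem.List.pyGet? xs (i : Int)).getD 0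

-- A's inner j-loop scans vertebrates for the first j with vertebrates[j] == animals[i] and breaks:
-- its only effect is the membership test, transliterated as List.contains (the same linear scan).
def biggest_vertebrate (animals : List String) (weights : List Int) (vertebrates : List String) : Option String :=
  if animals.length == 0 || vertebrates.length == 0 then none
  else
    let st := (List.range animals.length).foldl
      (fun (st : Int × String) (i : Nat) =>
        if vertebrates.contains (pvGetS animals i) then
          if st.1 < pvGetI weights i then (pvGetI weights i, pvGetS animals i) else st
        else st) (0, "")
    if st.1 == 0 then none else some st.2

-- ===== PORT B =====
def biggest_vertebrate_alt (animals : List String) (weights : List Int) (vertebrates : List String) : Option String :=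
  let cands := (List.range animals.length).filter
    (fun (i : Nat) => (PySem.Set.ofList vertebrates).contains (pvGetS animals i)
                      && decide (0 < pvGetI weights i))
  match PySem.List.sorted cands (fun i => pvGetI weights i) true with
  | [] => none
  | c :: _ => some (pvGetS animals c)

-- ===== PRECONDITION & SPEC =====
-- Pre_ excludes exactly the inputs where Python A raises IndexError: an index i whose animal occurs
-- in vertebrates but i ≥ len(weights) (weights[i] is only read on a membership match).
def Pre_biggest_vertebrate (animals : List String) (weights : List Int) (vertebrates : List String) : Prop :=
  ∀ i : Fin animals.length, vertebrates.contains animals[i] = true → (i : Nat) < weights.length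
instance (animals : List String) (weights : List Int) (vertebrates : List String) : Decidable (Pre_biggest_vertebrate animals weights vertebrates) := by unfold Pre_biggest_vertebrate; infer_instance
def pvWitness_biggest_vertebrate : List String × List Int × List String :=
  (["cat", "dog", "fly"], [5, 3, 9], ["dog", "cat"])
def Spec_biggest_vertebrate (animals : List String) (weights : List Int) (vertebrates : List String) (out : Option String) : Prop := out = biggest_vertebrate_alt animals weights vertebrates
instance (animals : List String) (weights : List Int) (vertebrates : List String) (out : Option String) : Decidable (Spec_biggest_vertebrate animals weights vertebrates out) := by unfold Spec_biggest_vertebrate; infer_instance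

-- ===== CLAIM (what is proved, stated in full; the proofs are below) =====
def Claim_equal_biggest_vertebrate : Prop := ∀ (animals : List String) (weights : List Int) (vertebrates : List String), Dom_biggest_vertebrate animals weights vertebrates → Pre_biggest_vertebrate animals weights vertebrates → Spec_biggest_vertebrate animals weights vertebrates (biggest_vertebrate animals weights vertebrates)

-- ===== LEMMAS AND PROOFS =====

-- the fold function of PySem.List.max? (named so the two ports' folds can be compared to it)
def pvMaxF {α : Type} (key : α → Int) : Option α → α → Option α :=
  fun m x =>
    match m with
    | none => some x
    | some m => if key m < key x then some x else some m

-- head of the insertBy fold evolves exactly like the running first-max fold state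
theorem pv_head_foldl_insertBy {α : Type} (before : α → α → Bool) :
    ∀ (xs acc : List α),
      (xs.foldl (fun a x => PySem.List.insertBy before x a) acc).head? =
        xs.foldl (fun m x =>
          match m with
          | none => some x
          | some m => if before x m then some x else some m) acc.head? := by
  intro xs
  induction xs with
  | nil => intro acc; rfl
  | cons x t ih =>
      intro acc
      simp only [List.foldl_cons, ih]
      congr 1
      cases acc with
      | nil => rfl
      | cons y ys =>
          by_cases h : before x y = true
          · simp [PySem.List.insertBy, h]
          · simp [PySem.List.insertBy, h]

-- head of the stable reverse sort is Python's max(xs, key) (first extremal element)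
theorem pv_head_sorted_rev {α : Type} (xs : List α) (key : α → Int) :
    (PySem.List.sorted xs key true).head? = PySem.List.max? xs key := by
  rw [PySem.List.sorted_rev_eq_foldl_insertBy, pv_head_foldl_insertBy]
  show _ = PySem.List.max? xs key
  rw [PySem.List.max?]
  congr 1
  funext m x
  cases m with
  | none => rfl
  | some m => simp

-- A's loop skips every index that is not a positive-weight vertebrate match, so it equals the
-- same fold over the filtered candidate list (the accumulator's weight stays nonnegative).
theorem pv_foldl_filter (mem? : Nat → Bool) (w : Nat → Int) (g : Nat → String) :
    ∀ (l : List Nat) (acc : Int × String), 0 ≤ acc.1 →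
      l.foldl (fun st i =>
          if mem? i then (if st.1 < w i then (w i, g i) else st) else st) acc =
      (l.filter (fun i => mem? i && decide (0 < w i))).foldl
          (fun st i => if st.1 < w i then (w i, g i) else st) acc := by
  intro l
  induction l with
  | nil => intro acc _; rfl
  | cons x t ih =>
      intro acc hacc
      rw [List.foldl_cons, List.filter_cons]
      by_cases hm : mem? x = true
      · rw [if_pos hm]
        by_cases hw : 0 < w x
        · rw [if_pos (by simp [hm, hw] : (mem? x && decide (0 < w x)) = true),
            List.foldl_cons]
          by_cases hlt : acc.1 < w x
          · simp only [if_pos hlt]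
            exact ih _ (le_of_lt hw)
          · simp only [if_neg hlt]
            exact ih _ hacc
        · have hlt : ¬ acc.1 < w x := by omega
          rw [if_neg hlt, if_neg (by simp [hw] : ¬ (mem? x && decide (0 < w x)) = true)]
          exact ih _ hacc
      · rw [if_neg hm, if_neg (by simp [hm] : ¬ (mem? x && decide (0 < w x)) = true)]
        exact ih _ hacc

-- the strict-running-max fold over positive-weight indices represents the pvMaxF fold
theorem pv_foldl_repr (w : Nat → Int) (g : Nat → String) :
    ∀ (l : List Nat), (∀ i ∈ l, 0 < w i) → ∀ (m : Option Nat),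
      l.foldl (fun st i => if st.1 < w i then (w i, g i) else st)
          (match m with | none => ((0 : Int), "") | some c => (w c, g c)) =
      (match l.foldl (pvMaxF w) m with
        | none => ((0 : Int), "")
        | some c => (w c, g c)) := by
  intro l
  induction l with
  | nil => intro _ m; rfl
  | cons x t ih =>
      intro hpos m
      have hx : 0 < w x := hpos x (List.mem_cons_self ..)
      have ht : ∀ i ∈ t, 0 < w i := fun i hi => hpos i (List.mem_cons_of_mem _ hi)
      rw [List.foldl_cons, List.foldl_cons]
      cases m with
      | none =>
          rw [if_pos (hx : ((((0 : Int), "") : Int × String).1 < w x))]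
          exact ih ht (some x)
      | some c =>
          by_cases h : w c < w x
          · rw [if_pos h]
            have := ih ht (some x)
            simpa [pvMaxF, h] using this
          · rw [if_neg h]
            have := ih ht (some c)
            simpa [pvMaxF, h] using this

theorem pv_max?_eq_foldl {α : Type} (xs : List α) (key : α → Int) :
    PySem.List.max? xs key = xs.foldl (pvMaxF key) none := by
  rw [PySem.List.max?]
  congr 1

-- ===== VERDICT (by name: the statement is the Claim_ definition above) =====
theorem biggest_vertebrate_spec : Claim_equal_biggest_vertebrate := by
  intro animals weights vertebrates _ _
  unfold Spec_biggest_vertebrate biggest_vertebrate biggest_vertebrate_alt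
  have hset : ∀ s, (PySem.Set.ofList vertebrates).contains s = vertebrates.contains s := by
    intro s; simp [PySem.Set.mem_ofList]
  simp only [hset]
  set cands := (List.range animals.length).filter
    (fun i => vertebrates.contains (pvGetS animals i) && decide (0 < pvGetI weights i)) with hcands
  have hpos : ∀ i ∈ cands, 0 < pvGetI weights i := by
    intro i hi
    have h2 := List.of_mem_filter hi
    simp only [Bool.and_eq_true, decide_eq_true_eq] at h2
    exact h2.2
  have hA : (List.range animals.length).foldl
      (fun (st : Int × String) i =>
        if vertebrates.contains (pvGetS animals i) then
          if st.1 < pvGetI weights i then (pvGetI weights i, pvGetS animals i) else st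
        else st) (0, "") =
      (match PySem.List.max? cands (fun i => pvGetI weights i) with
        | none => ((0 : Int), "")
        | some c => (pvGetI weights c, pvGetS animals c)) := by
    rw [pv_foldl_filter (fun i => vertebrates.contains (pvGetS animals i))
        (fun i => pvGetI weights i) (fun i => pvGetS animals i)
        (List.range animals.length) (0, "") (le_refl 0)]
    rw [pv_max?_eq_foldl]
    exact pv_foldl_repr (fun i => pvGetI weights i) (fun i => pvGetS animals i) cands hpos none
  have hhd := pv_head_sorted_rev cands (fun i => pvGetI weights i)
  cases hmx : PySem.List.max? cands (fun i => pvGetI weights i) with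
  | none =>
      have hc : cands = [] := (PySem.List.max?_eq_none_iff cands _).mp hmx
      have hs : PySem.List.sorted cands (fun i => pvGetI weights i) true = [] := by
        rw [hc]; rfl
      rw [hs]
      by_cases hnil : (animals.length == 0 || vertebrates.length == 0) = true
      · rw [if_pos hnil]
      · rw [if_neg hnil, hA, hmx]
        rfl
  | some c =>
      have hcmem : c ∈ cands := PySem.List.max?_mem hmx
      have hwc : 0 < pvGetI weights c := hpos c hcmem
      have hrange := List.mem_filter.mp hcmem
      have hmemc : vertebrates.contains (pvGetS animals c) = true := by
        have h2 := hrange.2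
        simp only [Bool.and_eq_true, decide_eq_true_eq] at h2
        exact h2.1
      have hanim : ¬ animals.length = 0 := by
        intro h
        have h1 := hrange.1
        rw [h] at h1
        simp at h1
      have hvert : ¬ vertebrates.length = 0 := by
        intro h
        rw [List.eq_nil_of_length_eq_zero h] at hmemc
        simp at hmemc
      rw [if_neg (by simp [hanim, hvert]), hA, hmx]
      rw [hmx] at hhd
      cases hs : PySem.List.sorted cands (fun i => pvGetI weights i) true with
      | nil => rw [hs] at hhd; simp at hhd
      | cons c' t =>
          rw [hs] at hhd
          simp only [List.head?_cons, Option.some.injEq] at hhd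
          rw [hhd]
          rw [if_neg (by simp only [beq_iff_eq]; omega : ¬ (pvGetI weights c == 0) = true)]
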